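-- pv_equiv track=rewrite | github.com/TesfayeAdugna/competitive_programming | 2136. Earliest Possible Day of Full Bloom.py | earliestFullBloom
-- ===== SOURCE A (Python) =====
-- from typing import List
--
-- def earliestFullBloom(plantTime: List[int], growTime: List[int]) -> int:
--
--
--
--     pots, length = [], len(plantTime)
--
--     for index in range(length):
--
--         plant = plantTime[index]
--         grow = growTime[index]
--
--         pots.append([plant, grow])
--
--     pots = sorted(pots, key = lambda x:x[1], reverse = True)
--
--     current_day = 0
--     result = 0
--
--     for pot in pots:
--
--         current_plant , current_grow = pot
--
--         current_day = current_day + current_plant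
--
--         result = max(result, current_day + current_grow)
--
--     return result
-- ===== SOURCE B (Python) =====
-- from typing import List
--
-- def earliestFullBloom(plantTime: List[int], growTime: List[int]) -> int:
--     pots = sorted(zip(plantTime, growTime), key=lambda pg: pg[1], reverse=True)
--
--     # Divide and conquer: a segment of consecutive pots is summarised by
--     # (total planting days P, latest bloom day B relative to the segment start);
--     # two adjacent segments merge as (PL + PR, max(BL, PL + BR)).
--     def solve(lo, hi):  # summary of pots[lo:hi], hi > lo
--         if hi - lo == 1:
--             p, g = pots[lo]
--             return p, p + g
--         mid = (lo + hi) // 2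
--         pl, bl = solve(lo, mid)
--         pr, br = solve(mid, hi)
--         return pl + pr, max(bl, pl + br)
--
--     return max(0, solve(0, len(pots))[1]) if pots else 0
-- ===== Notes on version B (the rewrite author's own statement) =====
-- stated objective: alternative
-- what changed: Replaces A's sequential running-day/running-max accumulator loop with a divide-and-conquer reduction: each half-segment of the sorted pots is summarised as (total plant days, latest bloom day) and adjacent summaries are merged as (PL+PR, max(BL, PL+BR)).
import Mathlib
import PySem

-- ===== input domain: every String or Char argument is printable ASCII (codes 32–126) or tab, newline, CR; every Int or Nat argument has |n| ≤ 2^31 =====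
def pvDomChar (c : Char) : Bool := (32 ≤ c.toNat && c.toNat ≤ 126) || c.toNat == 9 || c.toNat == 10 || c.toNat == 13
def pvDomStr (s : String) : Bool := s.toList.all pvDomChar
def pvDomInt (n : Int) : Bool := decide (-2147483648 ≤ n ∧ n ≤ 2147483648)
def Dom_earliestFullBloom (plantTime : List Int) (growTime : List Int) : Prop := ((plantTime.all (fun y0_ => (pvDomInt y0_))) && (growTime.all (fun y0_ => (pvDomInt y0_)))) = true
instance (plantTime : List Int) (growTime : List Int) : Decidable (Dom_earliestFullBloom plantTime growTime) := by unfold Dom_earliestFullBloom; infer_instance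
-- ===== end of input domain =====

-- B keeps the sort but replaces A's sequential running-day/running-max loop with a
-- divide-and-conquer reduction combining segment summaries (totalPlant, bestBloom);
-- equal cost, different algorithm shape (objective: alternative).

-- ===== PORT A =====
def earliestFullBloom (plantTime : List Int) (growTime : List Int) : Int :=
  let length : Int := plantTime.length
  -- for index in range(length): pots.append([plant, grow])  (pyGetD is total; Pre_ keeps index in range of growTime)
  let pots : List (Int × Int) :=
    (PySem.List.pyRange 0 length 1).foldl
      (fun acc index =>
        let plant := PySem.List.pyGetD plantTime index 0
        let grow := PySem.List.pyGetD growTime index 0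
        acc ++ [(plant, grow)]) []
  let pots := PySem.List.sorted pots (fun x => x.2) true
  let st : Int × Int := pots.foldl
    (fun (s : Int × Int) pot =>
      let current_day := s.1 + pot.1
      (current_day, max s.2 (current_day + pot.2))) (0, 0)
  st.2

-- ===== PORT B =====
-- def solve(lo, hi): summary (total plant days, latest bloom day) of pots[lo:hi].
-- The fuel parameter (called with pots.length ≥ hi - lo, enough since each call halves
-- the interval) and the base test written 'hi ≤ lo + 1' (Python: 'hi - lo == 1') are
-- purely totality guards: every call Python makes has lo < hi and never exhausts them.
def pvSolve (pots : List (Int × Int)) : Nat → Nat → Nat → Int × Int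
  | 0, _, _ => (0, 0)
  | fuel + 1, lo, hi =>
    if hi ≤ lo + 1 then
      let pg := PySem.List.pyGetD pots (lo : Int) (0, 0)   -- pots[lo], in range on every reached call
      (pg.1, pg.1 + pg.2)
    else
      let mid := (lo + hi) / 2
      let l := pvSolve pots fuel lo mid
      let r := pvSolve pots fuel mid hi
      (l.1 + r.1, max l.2 (l.1 + r.2))

def earliestFullBloom_alt (plantTime : List Int) (growTime : List Int) : Int :=
  let pots := PySem.List.sorted (List.zip plantTime growTime) (fun pg => pg.2) true
  if pots = [] then 0
  else max 0 (pvSolve pots pots.length 0 pots.length).2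

-- ===== PRECONDITION & SPEC =====
-- Pre_ excludes exactly the inputs where A raises IndexError: growTime shorter than plantTime.
def Pre_earliestFullBloom (plantTime : List Int) (growTime : List Int) : Prop :=
  plantTime.length ≤ growTime.length
instance (plantTime : List Int) (growTime : List Int) : Decidable (Pre_earliestFullBloom plantTime growTime) := by unfold Pre_earliestFullBloom; infer_instance
def pvWitness_earliestFullBloom : List Int × List Int := ([1, 4, 3], [2, 0, 2])

def Spec_earliestFullBloom (plantTime : List Int) (growTime : List Int) (out : Int) : Prop := out = earliestFullBloom_alt plantTime growTime
instance (plantTime : List Int) (growTime : List Int) (out : Int) : Decidable (Spec_earliestFullBloom plantTime growTime out) := by unfold Spec_earliestFullBloom; infer_instance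

-- ===== CLAIM (what is proved, stated in full; the proofs are below) =====
def Claim_equal_earliestFullBloom : Prop := ∀ (plantTime : List Int) (growTime : List Int), Dom_earliestFullBloom plantTime growTime → Pre_earliestFullBloom plantTime growTime → Spec_earliestFullBloom plantTime growTime (earliestFullBloom plantTime growTime)

-- ===== LEMMAS AND PROOFS =====

-- segment summary monoid
def pvComb (a b : Int × Int) : Int × Int := (a.1 + b.1, max a.2 (a.1 + b.2))
def pvVal (pg : Int × Int) : Int × Int := (pg.1, pg.1 + pg.2)

-- sequential summary of a nonempty segment
def pvG : List (Int × Int) → Int × Int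
  | [] => (0, 0)
  | x :: l => (l.map pvVal).foldl pvComb (pvVal x)

lemma pvComb_foldl (m : List (Int × Int)) (a b : Int × Int) :
    m.foldl pvComb (pvComb a b) = pvComb a (m.foldl pvComb b) := by
  induction m generalizing b with
  | nil => rfl
  | cons x m ih =>
      simp only [List.foldl_cons, ← ih]
      congr 1
      simp only [pvComb, Prod.mk.injEq]
      constructor
      · ring
      · omega

lemma pvG_cons (x : Int × Int) (l : List (Int × Int)) (h : l ≠ []) :
    pvG (x :: l) = pvComb (pvVal x) (pvG l) := by
  cases l with
  | nil => exact absurd rfl h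
  | cons y m =>
      simp only [pvG, List.map_cons, List.foldl_cons, pvComb_foldl]

lemma pvG_append (l1 l2 : List (Int × Int)) (h1 : l1 ≠ []) (h2 : l2 ≠ []) :
    pvG (l1 ++ l2) = pvComb (pvG l1) (pvG l2) := by
  induction l1 with
  | nil => exact absurd rfl h1
  | cons x l1 ih =>
      cases l1 with
      | nil =>
          simp only [List.cons_append, List.nil_append]
          exact pvG_cons x l2 h2
      | cons y m =>
          rw [List.cons_append, pvG_cons x ((y :: m) ++ l2) (by simp),
            ih (by simp), pvG_cons x (y :: m) (by simp)]
          simp only [pvComb, Prod.mk.injEq]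
          constructor
          · ring
          · omega

-- pvSolve computes the sequential summary of the slice pots[lo:hi]
lemma pvSolve_eq (pots : List (Int × Int)) :
    ∀ fuel lo hi, lo < hi → hi ≤ pots.length → hi - lo ≤ fuel →
      pvSolve pots fuel lo hi = pvG ((pots.drop lo).take (hi - lo)) := by
  intro fuel
  induction fuel with
  | zero => intro lo hi hlt _ hf; omega
  | succ fuel ih =>
    intro lo hi hlt hle hf
    rw [pvSolve]
    by_cases hbase : hi ≤ lo + 1
    · have hlo : lo < pots.length := by omega
      rw [if_pos hbase]
      have hdrop : pots.drop lo = pots[lo] :: pots.drop (lo + 1) :=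
        List.drop_eq_getElem_cons hlo
      have h1 : hi - lo = 1 := by omega
      rw [h1, hdrop, List.take_succ_cons, List.take_zero]
      simp [pvG, pvVal, PySem.List.pyGetD_natCast, List.getD_eq_getElem?_getD, hlo]
    · simp only [if_neg hbase]
      have hmidl : lo < (lo + hi) / 2 := by omega
      have hmidr : (lo + hi) / 2 < hi := by omega
      rw [ih lo ((lo + hi) / 2) hmidl (by omega) (by omega),
          ih ((lo + hi) / 2) hi hmidr hle (by omega)]
      have hsplit : (pots.drop lo).take (hi - lo)
          = (pots.drop lo).take ((lo + hi) / 2 - lo)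
            ++ (pots.drop ((lo + hi) / 2)).take (hi - (lo + hi) / 2) := by
        rw [show hi - lo = ((lo + hi) / 2 - lo) + (hi - (lo + hi) / 2) by omega,
          List.take_add, List.drop_drop]
        simp only [show lo + ((lo + hi) / 2 - lo) = (lo + hi) / 2 from by omega]
      rw [hsplit, pvG_append]
      · rfl
      · have : ((pots.drop lo).take ((lo + hi) / 2 - lo)).length = (lo + hi) / 2 - lo := by
          simp; omega
        intro hc; rw [hc] at this; simp at this; omega
      · have : ((pots.drop ((lo + hi) / 2)).take (hi - (lo + hi) / 2)).length
            = hi - (lo + hi) / 2 := by simp; omega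
        intro hc; rw [hc] at this; simp at this; omega

-- A's combined loop computes the sequential summary too
lemma pvA_fold (l : List (Int × Int)) (h : l ≠ []) (cd res : Int) :
    l.foldl (fun (s : Int × Int) pot =>
        (s.1 + pot.1, max s.2 (s.1 + pot.1 + pot.2))) (cd, res)
      = (cd + (pvG l).1, max res (cd + (pvG l).2)) := by
  induction l generalizing cd res with
  | nil => exact absurd rfl h
  | cons x l ih =>
      cases l with
      | nil => simp [pvG, pvVal, Int.add_assoc]
      | cons y m =>
          rw [List.foldl_cons, ih (by simp), pvG_cons x (y :: m) (by simp)]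
          simp only [pvComb, pvVal, Prod.mk.injEq]
          constructor
          · ring
          · omega

-- A's pots-building loop is zip when growTime is long enough
lemma pvBuild_eq_zip (plantTime growTime : List Int)
    (h : plantTime.length ≤ growTime.length) :
    (PySem.List.pyRange 0 (plantTime.length : Int) 1).foldl
      (fun acc index =>
        acc ++ [(PySem.List.pyGetD plantTime index 0, PySem.List.pyGetD growTime index 0)]) []
      = List.zip plantTime growTime := by
  rw [PySem.List.foldl_append_singleton_eq_map]
  apply List.ext_getElem
  · simp [PySem.List.length_pyRange_one, List.length_zip]; omega
  · intro k h1 h2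
    have hk : k < plantTime.length := by
      simp [PySem.List.length_pyRange_one] at h1; omega
    have hk2 : k < growTime.length := lt_of_lt_of_le hk h
    simp [PySem.List.getElem_pyRange_one, List.getElem_zip, PySem.List.pyGetD_natCast, hk, hk2]

-- ===== VERDICT (by name: the statement is the Claim_ definition above) =====
theorem earliestFullBloom_spec : Claim_equal_earliestFullBloom := by
  intro plantTime growTime _ hpre
  unfold Spec_earliestFullBloom earliestFullBloom earliestFullBloom_alt
  simp only [pvBuild_eq_zip plantTime growTime hpre]
  set pots := PySem.List.sorted (List.zip plantTime growTime) (fun pg => pg.2) true with hpots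
  by_cases hp : pots = []
  · simp [hp]
  · rw [if_neg hp, pvA_fold pots hp 0 0,
      pvSolve_eq pots pots.length 0 pots.length (List.length_pos_iff.mpr hp) le_rfl (by omega)]
    simp
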